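-- pv_equiv track=rewrite | github.com/kkr010128/codebert | problem251/problem251_115.py | solve
-- ===== SOURCE A (Python) =====
-- def solve(n,k,r,s,p,t):
--   winHand = {"r":"p", "s":"b", "p":"s"}
--   bestHandMemo = [""]*(n+1) # i手目の勝ち手
--
--   memo = [-1]*(n+1)
--   def calcPoint(char):
--     if char == "r":
--       return p
--     elif char == "s":
--       return r
--     elif char == "p":
--       return s
--     else:
--       raise ValueError
--   def dp(i):
--     if i == 0:
--       return 0
--     elif memo[i] != -1:
--       return memo[i]
--     elif i <= k:
--       bestHandMemo[i-1] = winHand[t[i-1]] # 自由に出せる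
--       return dp(i-1) + calcPoint(t[i-1])
--     elif winHand[t[i-1]] == bestHandMemo[i-k-1]:
--       bestHandMemo[i-1] = "" # あいこでも負けても同じこと
--       return dp(i-1)
--     else: # 勝てる
--       bestHandMemo[i-1] = winHand[t[i-1]]
--       return dp(i-1) + calcPoint(t[i-1])
--
--   for i in range(n+1):
--     memo[i] = dp(i)
--
--   return memo[n]
-- ===== SOURCE B (Python) =====
-- def solve(n, k, r, s, p, t):
--     win = {"r": "p", "s": "b", "p": "s"}
--     pts = {"r": p, "s": r, "p": s}
--     best = []
--     total = 0
--     for i in range(1, n + 1):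
--         h = win[t[i - 1]]
--         if i <= k or h != best[i - k - 1]:
--             best.append(h)
--             total += pts[t[i - 1]]
--         else:
--             best.append("")
--     return total
-- ===== Notes on version B (the rewrite author's own statement) =====
-- stated objective: simpler
-- what changed: Replaces A's memoised recursion (inner dp function, a memo array refilled by an outer loop, and a size-n+1 bestHandMemo array mutated in place) by one forward loop that appends each round's played hand to a growing list and accumulates the running total directly.
-- outside the precondition, e.g. on solve(2, 0, 1, 2, 3, 'rs'): A returns 4, B raises IndexError; on solve(2, -1, 1, 2, 3, 'rs'): A returns 4, B raises IndexError
import Mathlib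
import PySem

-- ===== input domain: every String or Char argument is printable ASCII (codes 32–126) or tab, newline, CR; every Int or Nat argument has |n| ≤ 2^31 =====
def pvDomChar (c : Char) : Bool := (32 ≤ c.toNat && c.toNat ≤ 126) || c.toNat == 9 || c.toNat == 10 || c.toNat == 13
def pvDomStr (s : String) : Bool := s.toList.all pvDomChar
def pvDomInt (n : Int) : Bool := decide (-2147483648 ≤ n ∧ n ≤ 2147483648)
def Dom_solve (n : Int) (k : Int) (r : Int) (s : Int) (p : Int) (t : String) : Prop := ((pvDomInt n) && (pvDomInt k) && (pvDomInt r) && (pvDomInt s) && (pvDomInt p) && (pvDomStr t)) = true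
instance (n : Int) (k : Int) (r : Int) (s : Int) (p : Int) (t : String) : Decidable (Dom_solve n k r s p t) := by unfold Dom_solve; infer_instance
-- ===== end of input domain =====

-- B replaces A's memoised recursion (dp + memo array + mutated bestHandMemo of size n+1)
-- by a single forward loop that grows a list of played hands and accumulates the total (objective: simpler).


-- ===== PORT A =====
-- Python's one-character strings t[i-1] / winHand values are modelled as Char; the "" sentinel
-- stored in bestHandMemo is modelled as `none` (entries are Option Char).
def pvWinHand : PySem.Dict Char Char := PySem.Dict.ofList [('r','p'), ('s','b'), ('p','s')]

def pvCalcPoint (r : Int) (s : Int) (p : Int) (ch : Char) : Int :=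
  if ch = 'r' then p
  else if ch = 's' then r
  else if ch = 'p' then s
  else 0  -- Python raises ValueError here; unreachable under Pre_solve

-- dp(i) of A: `memo` is only read inside dp; `bestHandMemo` (mutated in place in Python) is
-- threaded through as state and returned alongside the value.
def pvDp (k : Int) (r : Int) (s : Int) (p : Int) (t : String) (memo : List Int) :
    Nat → List (Option Char) → Int × List (Option Char)
  | 0, best => (0, best)
  | i+1, best =>
    if memo.getD (i+1) (-1) ≠ -1 then (memo.getD (i+1) (-1), best)
    else
      -- t[i-1] (IndexError) and winHand[t[i-1]] (KeyError) are excluded by Pre_solve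
      let ch := (PySem.Str.pyGet? t ((i+1 : Int) - 1)).getD ' '
      let w := pvWinHand.get? ch
      if ((i+1 : Int)) ≤ k then
        let best1 := best.set i w
        let res := pvDp k r s p t memo i best1
        (res.1 + pvCalcPoint r s p ch, res.2)
      else if w = best.getD (((i+1 : Int)) - k - 1).toNat none then  -- idx ≥ 0, in range under Pre_solve
        let best1 := best.set i none
        pvDp k r s p t memo i best1
      else
        let best1 := best.set i w
        let res := pvDp k r s p t memo i best1
        (res.1 + pvCalcPoint r s p ch, res.2)

def solve (n : Int) (k : Int) (r : Int) (s : Int) (p : Int) (t : String) : Int :=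
  let memo0 : List Int := List.replicate (n+1).toNat (-1)
  let best0 : List (Option Char) := List.replicate (n+1).toNat none
  -- for i in range(n+1): memo[i] = dp(i)   (range(n+1) as the Nat indices 0,…,n)
  let st := (List.range (n+1).toNat).foldl
    (fun (st : List Int × List (Option Char)) i =>
      let res := pvDp k r s p t st.1 i st.2
      (st.1.set i res.1, res.2))
    (memo0, best0)
  (PySem.List.pyGet? st.1 n).getD 0  -- memo[n]; none (IndexError for n < 0) excluded by Pre_solve

-- ===== PORT B =====
def pvWinB : PySem.Dict Char Char := PySem.Dict.ofList [('r','p'), ('s','b'), ('p','s')]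
def pvPtsB (r : Int) (s : Int) (p : Int) : PySem.Dict Char Int :=
  PySem.Dict.ofList [('r', p), ('s', r), ('p', s)]

-- one iteration of B's loop: state = (best, total), i = Python's loop variable
def pvStep (k : Int) (r : Int) (s : Int) (p : Int) (t : String)
    (st : List (Option Char) × Int) (i : Int) : List (Option Char) × Int :=
  let ch := (PySem.Str.pyGet? t (i - 1)).getD ' '  -- IndexError excluded by Pre_solve
  let h := pvWinB.get? ch                           -- KeyError excluded by Pre_solve
  if i ≤ k ∨ h ≠ st.1.getD (i - k - 1).toNat none then  -- index ≥ 0, in range under Pre_solve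
    (st.1 ++ [h], st.2 + (pvPtsB r s p).getD ch 0)
  else
    (st.1 ++ [none], st.2)

def solve_alt (n : Int) (k : Int) (r : Int) (s : Int) (p : Int) (t : String) : Int :=
  ((PySem.List.pyRange 1 (n+1) 1).foldl (pvStep k r s p t) ([], 0)).2

-- ===== PRECONDITION & SPEC =====
-- Pre_solve excludes: n < 0 or n > len(t) (IndexError in A), a non-'r'/'s'/'p' char among the
-- first n (KeyError/ValueError in A), and — the only inputs where A returns a value — n ≥ 1 with
-- k ∈ {-1, 0}, where A reads not-yet-written "" slots of bestHandMemo and scores every round while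
-- B's list of already-played hands has no such slot and raises IndexError.
def Pre_solve (n : Int) (k : Int) (r : Int) (s : Int) (p : Int) (t : String) : Prop :=
  0 ≤ n ∧ n ≤ (t.toList.length : Int) ∧
  ((t.toList.take n.toNat).all (fun c => c == 'r' || c == 's' || c == 'p') = true) ∧
  (n = 0 ∨ 1 ≤ k)
instance (n : Int) (k : Int) (r : Int) (s : Int) (p : Int) (t : String) : Decidable (Pre_solve n k r s p t) := by unfold Pre_solve; infer_instance

def pvWitness_solve : Int × Int × Int × Int × Int × String := (3, 2, 1, 2, 3, "rsp")

def Spec_solve (n : Int) (k : Int) (r : Int) (s : Int) (p : Int) (t : String) (out : Int) : Prop := out = solve_alt n k r s p t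
instance (n : Int) (k : Int) (r : Int) (s : Int) (p : Int) (t : String) (out : Int) : Decidable (Spec_solve n k r s p t out) := by unfold Spec_solve; infer_instance

-- ===== CLAIM (what is proved, stated in full; the proofs are below) =====
def Claim_equal_solve : Prop := ∀ (n : Int) (k : Int) (r : Int) (s : Int) (p : Int) (t : String), Dom_solve n k r s p t → Pre_solve n k r s p t → Spec_solve n k r s p t (solve n k r s p t)

-- ===== LEMMAS AND PROOFS =====

-- B's loop state after m iterations (rounds 1,…,m)
def pvBst (k : Int) (r : Int) (s : Int) (p : Int) (t : String) : Nat → List (Option Char) × Int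
  | 0 => ([], 0)
  | m+1 => pvStep k r s p t (pvBst k r s p t m) ((m : Int) + 1)

-- the hand B plays (none = plays nothing that scores) in round j+1
def pvBB (k : Int) (r : Int) (s : Int) (p : Int) (t : String) (j : Nat) : Option Char :=
  (pvBst k r s p t (j+1)).1.getD j none

theorem pvPts_eq_calc (r s p : Int) (ch : Char) :
    (pvPtsB r s p).getD ch 0 = pvCalcPoint r s p ch := by
  simp only [pvPtsB, pvCalcPoint, PySem.Dict.ofList, PySem.Dict.update, List.foldl,
    PySem.Dict.getD_insert, PySem.Dict.getD_empty]
  split_ifs <;> simp_all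

theorem pvWin_eq : pvWinB = pvWinHand := rfl

theorem pvBst_len (k r s p : Int) (t : String) (m : Nat) :
    (pvBst k r s p t m).1.length = m := by
  induction m with
  | zero => rfl
  | succ m ih =>
    simp only [pvBst, pvStep]
    split <;> simp [ih]

theorem pvBst_getD (k r s p : Int) (t : String) (m j : Nat) (hj : j < m) :
    (pvBst k r s p t m).1.getD j none = pvBB k r s p t j := by
  induction m with
  | zero => omega
  | succ m ih =>
    rcases Nat.lt_or_ge j m with h | h
    · have hlen : j < (pvBst k r s p t m).1.length := by rw [pvBst_len]; exact h
      rw [← ih h]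
      simp only [pvBst, pvStep]
      split <;>
        simp [List.getD_eq_getElem?_getD, List.getElem?_append_left hlen]
    · have : j = m := by omega
      subst this
      rfl

-- the dp(i) characterisation: with memo entries either unset (-1) or the already-computed state
-- values, and best correct strictly below i-1, dp(i) returns B's running total and (re)writes
-- best so that it is correct below i, touching nothing at indices ≥ i.
theorem pvDp_spec (k r s p : Int) (t : String) (memo : List Int) (hk : 1 ≤ k)
    (hm : ∀ j : Nat, memo.getD j (-1) = -1 ∨ memo.getD j (-1) = (pvBst k r s p t j).2) :
    ∀ (i : Nat) (best : List (Option Char)),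
      (∀ j : Nat, j + 1 < i → best.getD j none = pvBB k r s p t j) →
      i ≤ best.length →
      (pvDp k r s p t memo i best).1 = (pvBst k r s p t i).2 ∧
      (pvDp k r s p t memo i best).2.length = best.length ∧
      (∀ j : Nat, i ≤ j → (pvDp k r s p t memo i best).2.getD j none = best.getD j none) ∧
      (∀ j : Nat, j + 1 < i → (pvDp k r s p t memo i best).2.getD j none = pvBB k r s p t j) ∧
      (memo.getD i (-1) = -1 →
        ∀ j : Nat, j < i → (pvDp k r s p t memo i best).2.getD j none = pvBB k r s p t j) := by
  intro i
  induction i with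
  | zero =>
    intro best _ _
    exact ⟨rfl, rfl, fun _ _ => rfl, fun j hj => absurd hj (by omega), fun _ j hj => absurd hj (by omega)⟩
  | succ i ih =>
    intro best hbest hlen
    by_cases hmemo : memo.getD (i+1) (-1) = -1
    case neg =>
      -- memo hit: dp returns the stored value, best untouched
      have hval : memo.getD (i+1) (-1) = (pvBst k r s p t (i+1)).2 := (hm (i+1)).resolve_left hmemo
      have hif : pvDp k r s p t memo (i+1) best = (memo.getD (i+1) (-1), best) := by
        simp only [pvDp, if_pos hmemo]
      rw [hif]
      exact ⟨hval, rfl, fun _ _ => rfl, fun j hj => hbest j hj, fun h => absurd h hmemo⟩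
    case pos =>
      simp only [pvDp, hmemo, ne_eq, not_true_eq_false, if_false]
      -- the character and winning hand of round i+1, shared by both ports
      set ch := (PySem.Str.pyGet? t ((i:Int) + 1 - 1)).getD ' ' with hch
      set w := pvWinHand.get? ch with hw
      have hilen : i < best.length := by omega
      -- helper facts reused by all three branches, parameterised by the written value x
      have key : ∀ x : Option Char,
          (pvBst k r s p t (i+1)).1 = (pvBst k r s p t i).1 ++ [x] →
          (∀ j : Nat, j + 1 < i → (best.set i x).getD j none = pvBB k r s p t j) ∧
          (∀ j : Nat, j < i + 1 →
            (pvDp k r s p t memo i (best.set i x)).2.getD j none = pvBB k r s p t j) ∧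
          (pvDp k r s p t memo i (best.set i x)).1 = (pvBst k r s p t i).2 ∧
          (pvDp k r s p t memo i (best.set i x)).2.length = best.length ∧
          (∀ j : Nat, i + 1 ≤ j →
            (pvDp k r s p t memo i (best.set i x)).2.getD j none = best.getD j none) := by
        intro x happ
        have hb1 : ∀ j : Nat, j + 1 < i → (best.set i x).getD j none = pvBB k r s p t j := by
          intro j hj
          rw [List.getD_eq_getElem?_getD, List.getElem?_set_ne (by omega),
            ← List.getD_eq_getElem?_getD]
          exact hbest j (by omega)
        have hl1 : i ≤ (best.set i x).length := by simp; omega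
        obtain ⟨C1, C2, C3, C4, C5⟩ := ih (best.set i x) hb1 hl1
        have hbbx : pvBB k r s p t i = x := by
          have hlen' : (pvBst k r s p t i).1.length = i := pvBst_len k r s p t i
          unfold pvBB
          rw [happ, List.getD_eq_getElem?_getD, List.getElem?_append_right (by omega)]
          simp [hlen']
        refine ⟨hb1, ?_, C1, by simpa using C2, ?_⟩
        · intro j hj
          rcases Nat.lt_or_ge j i with hji | hji
          · -- j < i
            by_cases hmi : memo.getD i (-1) = -1
            · exact C5 hmi j hji
            · -- dp(i) is an immediate memo hit, best.set i x is returned unchanged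
              have hres : (pvDp k r s p t memo i (best.set i x)).2 = best.set i x := by
                cases i with
                | zero => rfl
                | succ m => simp only [pvDp, if_pos hmi]
              rw [hres, List.getD_eq_getElem?_getD, List.getElem?_set_ne (by omega),
                ← List.getD_eq_getElem?_getD]
              exact hbest j (by omega)
          · -- j = i
            have : j = i := by omega
            subst this
            rw [C3 j le_rfl, hbbx, List.getD_eq_getElem?_getD,
              List.getElem?_set_self hilen]
            rfl
        · intro j hj
          rw [C3 j (by omega), List.getD_eq_getElem?_getD,
            List.getElem?_set_ne (by omega), ← List.getD_eq_getElem?_getD]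
      by_cases hik : ((i:Int) + 1) ≤ k
      case pos =>
        -- free round: play the winning hand
        have happ : (pvBst k r s p t (i+1)).1 = (pvBst k r s p t i).1 ++ [w] ∧
            (pvBst k r s p t (i+1)).2 = (pvBst k r s p t i).2 + (pvPtsB r s p).getD ch 0 := by
          simp only [pvBst, pvStep, pvWin_eq, ← hch, ← hw]
          rw [if_pos (Or.inl hik)]
          exact ⟨rfl, rfl⟩
        obtain ⟨hb1, hall, C1, C2, C3⟩ := key w happ.1
        simp only [if_pos hik]
        refine ⟨?_, C2, C3, fun j hj => hall j (by omega), fun _ j hj => hall j hj⟩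
        rw [C1, happ.2, pvPts_eq_calc]
      case neg =>
        -- constrained round: compare with the hand played k rounds earlier
        have hki : k ≤ (i : Int) := by omega
        set m := (((i:Int) + 1) - k - 1).toNat with hmdef
        have hmi : m < i := by omega
        have hread : best.getD m none = pvBB k r s p t m := hbest m (by omega)
        have hreadB : (pvBst k r s p t i).1.getD m none = pvBB k r s p t m :=
          pvBst_getD k r s p t i m hmi
        by_cases htie : w = best.getD m none
        case pos =>
          -- A ties/loses on purpose; B's condition is false too
          have hcond : ¬ (((i:Int) + 1) ≤ k ∨
              w ≠ (pvBst k r s p t i).1.getD (((i:Int) + 1) - k - 1).toNat none) := by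
            rw [← hmdef, hreadB, ← hread]
            simp [hik, htie]
          have happ : (pvBst k r s p t (i+1)).1 = (pvBst k r s p t i).1 ++ [none] ∧
              (pvBst k r s p t (i+1)).2 = (pvBst k r s p t i).2 := by
            simp only [pvBst, pvStep, pvWin_eq, ← hch, ← hw]
            rw [if_neg hcond]
            exact ⟨rfl, rfl⟩
          obtain ⟨hb1, hall, C1, C2, C3⟩ := key none happ.1
          simp only [if_neg hik, if_pos htie]
          exact ⟨by rw [C1, happ.2], C2, C3, fun j hj => hall j (by omega), fun _ j hj => hall j hj⟩
        case neg =>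
          -- A can win; B's condition is true via the right disjunct
          have hcond : (((i:Int) + 1) ≤ k ∨
              w ≠ (pvBst k r s p t i).1.getD (((i:Int) + 1) - k - 1).toNat none) := by
            rw [← hmdef, hreadB, ← hread]
            exact Or.inr htie
          have happ : (pvBst k r s p t (i+1)).1 = (pvBst k r s p t i).1 ++ [w] ∧
              (pvBst k r s p t (i+1)).2 = (pvBst k r s p t i).2 + (pvPtsB r s p).getD ch 0 := by
            simp only [pvBst, pvStep, pvWin_eq, ← hch, ← hw]
            rw [if_pos hcond]
            exact ⟨rfl, rfl⟩
          obtain ⟨hb1, hall, C1, C2, C3⟩ := key w happ.1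
          simp only [if_neg hik, if_neg htie]
          refine ⟨?_, C2, C3, fun j hj => hall j (by omega), fun _ j hj => hall j hj⟩
          rw [C1, happ.2, pvPts_eq_calc]

theorem pvLoop_spec (n k r s p : Int) (t : String) (hk : 1 ≤ k) (hn : 0 ≤ n) :
    ∀ M : Nat, M ≤ (n+1).toNat →
      let st := (List.range M).foldl
        (fun (st : List Int × List (Option Char)) i =>
          let res := pvDp k r s p t st.1 i st.2
          (st.1.set i res.1, res.2))
        (List.replicate (n+1).toNat (-1), List.replicate (n+1).toNat none)
      st.1.length = (n+1).toNat ∧ st.2.length = (n+1).toNat ∧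
      (∀ j : Nat, st.1.getD j (-1) = if j < M then (pvBst k r s p t j).2 else -1) ∧
      (∀ j : Nat, j + 1 < M → st.2.getD j none = pvBB k r s p t j) := by
  intro M
  induction M with
  | zero =>
    intro _
    refine ⟨by simp, by simp, fun j => ?_, fun j hj => absurd hj (by omega)⟩
    simp [List.getD_eq_getElem?_getD, List.getElem?_replicate]
    split <;> simp
  | succ M ihM =>
    intro hM
    obtain ⟨L1, L2, L3, L4⟩ := ihM (by omega)
    simp only [List.range_succ, List.foldl_append, List.foldl_cons, List.foldl_nil]
    set st := (List.range M).foldl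
        (fun (st : List Int × List (Option Char)) i =>
          let res := pvDp k r s p t st.1 i st.2
          (st.1.set i res.1, res.2))
        (List.replicate (n+1).toNat (-1), List.replicate (n+1).toNat none) with hst
    have hm : ∀ j : Nat, st.1.getD j (-1) = -1 ∨ st.1.getD j (-1) = (pvBst k r s p t j).2 := by
      intro j; rw [L3 j]; split <;> simp
    obtain ⟨C1, C2, C3, C4, C5⟩ :=
      pvDp_spec k r s p t st.1 hk hm M st.2 L4 (by omega)
    have hMhit : st.1.getD M (-1) = -1 := by rw [L3 M]; simp
    refine ⟨by simpa using L1, by simpa using C2.trans L2, fun j => ?_, fun j hj => ?_⟩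
    · rcases eq_or_ne j M with hjM | hjM
      · subst hjM
        rw [List.getD_eq_getElem?_getD, List.getElem?_set_self (by omega), Option.getD_some, C1]
        simp
      · rw [List.getD_eq_getElem?_getD, List.getElem?_set_ne (by omega),
          ← List.getD_eq_getElem?_getD, L3 j]
        by_cases h2 : j < M
        · rw [if_pos h2, if_pos (by omega)]
        · rw [if_neg h2, if_neg (by omega)]
    · exact C5 hMhit j (by omega)

theorem pvFold_eq_bst (k r s p : Int) (t : String) (m : Nat) :
    (PySem.List.pyRange 1 ((m:Int)+1) 1).foldl (pvStep k r s p t) ([], 0) = pvBst k r s p t m := by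
  induction m with
  | zero => simp [PySem.List.pyRange_one_eq_nil, pvBst]
  | succ m ih =>
    have h : PySem.List.pyRange 1 ((m:Int)+1+1) 1 = PySem.List.pyRange 1 ((m:Int)+1) 1 ++ [(m:Int)+1] :=
      PySem.List.pyRange_one_succ_right (by omega)
    push_cast
    rw [h, List.foldl_append, ih]
    rfl

theorem solve_alt_eq_bst (n k r s p : Int) (t : String) (hn : 0 ≤ n) :
    solve_alt n k r s p t = (pvBst k r s p t n.toNat).2 := by
  have h : n + 1 = ((n.toNat : Int)) + 1 := by omega
  rw [solve_alt, h, pvFold_eq_bst]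

theorem solve_eq_bst (n k r s p : Int) (t : String) (hk : 1 ≤ k) (hn : 0 ≤ n) :
    solve n k r s p t = (pvBst k r s p t n.toNat).2 := by
  obtain ⟨L1, L2, L3, L4⟩ := pvLoop_spec n k r s p t hk hn (n+1).toNat le_rfl
  set st := (List.range (n+1).toNat).foldl
    (fun (st : List Int × List (Option Char)) i =>
      let res := pvDp k r s p t st.1 i st.2
      (st.1.set i res.1, res.2))
    (List.replicate (n+1).toNat (-1), List.replicate (n+1).toNat none) with hst
  show (PySem.List.pyGet? st.1 n).getD 0 = (pvBst k r s p t n.toNat).2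
  have hlt : n.toNat < (n+1).toNat := by omega
  have h3 := L3 n.toNat
  rw [if_pos hlt, List.getD_eq_getElem?_getD,
    List.getElem?_eq_getElem (by rw [L1]; omega), Option.getD_some] at h3
  rw [PySem.List.pyGet?_of_nonneg st.1 hn, List.getElem?_eq_getElem (by rw [L1]; omega),
    Option.getD_some, h3]

-- ===== VERDICT (by name: the statement is the Claim_ definition above) =====
theorem solve_spec : Claim_equal_solve := by
  intro n k r s p t _hdom hpre
  obtain ⟨hn, _hlen, _hch, hk⟩ := hpre
  unfold Spec_solve
  rcases hk with h0 | hk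
  · subst h0
    simp [solve, solve_alt, pvDp, PySem.List.pyRange_one_eq_nil, PySem.List.pyGet?, PySem.List.pyIdx?]
  · rw [solve_eq_bst n k r s p t hk hn, solve_alt_eq_bst n k r s p t hn]
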